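-- pv_equiv track=rewrite | github.com/grantphillips13/SYSC4906FinalProject | scripts/generate_flood_rain_config.py | moore_neighbors
-- ===== SOURCE A (Python) =====
-- ROWS            = 20
--
-- COLS            = 20
--
-- def moore_neighbors(r, c):
--     neighbors = []
--     for dr in [-1, 0, 1]:
--         for dc in [-1, 0, 1]:
--             if dr == 0 and dc == 0:
--                 continue
--             nr, nc = r + dr, c + dc
--             if 0 <= nr < ROWS and 0 <= nc < COLS:
--                 neighbors.append((nr, nc))
--     return neighbors
-- ===== SOURCE B (Python) =====
-- ROWS = 20
-- COLS = 20
--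
-- def moore_neighbors(r, c):
--     # Scan the whole fixed grid in row-major order and keep exactly the
--     # cells at Chebyshev distance 1 from (r, c).
--     return [(nr, nc)
--             for nr in range(ROWS)
--             for nc in range(COLS)
--             if max(abs(nr - r), abs(nc - c)) == 1]
-- ===== Notes on version B (the rewrite author's own statement) =====
-- stated objective: alternative
-- what changed: B scans the whole fixed 20x20 grid in row-major order and selects cells at Chebyshev distance exactly 1 from (r,c), instead of enumerating the 8 offset candidates and bound-checking each; it trades a larger constant (400 cells) for a declarative distance-based characterization with no offset enumeration.
import Mathlib
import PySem

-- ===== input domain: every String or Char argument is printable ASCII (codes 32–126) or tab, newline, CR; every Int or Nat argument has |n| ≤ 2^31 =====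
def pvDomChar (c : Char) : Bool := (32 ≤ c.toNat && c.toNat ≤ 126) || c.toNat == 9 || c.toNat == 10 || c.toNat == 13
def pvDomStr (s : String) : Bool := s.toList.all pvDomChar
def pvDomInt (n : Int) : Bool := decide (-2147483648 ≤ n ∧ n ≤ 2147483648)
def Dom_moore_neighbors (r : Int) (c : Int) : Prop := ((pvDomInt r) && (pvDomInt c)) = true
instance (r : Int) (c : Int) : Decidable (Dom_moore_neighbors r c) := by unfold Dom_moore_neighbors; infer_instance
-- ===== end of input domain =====

-- B scans the whole fixed 20x20 grid row-major and selects cells at Chebyshev distance exactly 1 from (r,c), instead of enumerating and bound-checking the 8 offsets (objective: alternative; same output, same order).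
-- ===== PORT A =====
def moore_neighbors (r : Int) (c : Int) : List (Int × Int) :=
  ([-1, 0, 1] : List Int).foldl (fun neighbors dr =>
    ([-1, 0, 1] : List Int).foldl (fun neighbors dc =>
      if dr == 0 && dc == 0 then neighbors
      else
        let nr := r + dr
        let nc := c + dc
        if 0 ≤ nr ∧ nr < 20 ∧ 0 ≤ nc ∧ nc < 20 then neighbors ++ [(nr, nc)]
        else neighbors) neighbors) []

-- ===== PORT B =====
def moore_neighbors_alt (r : Int) (c : Int) : List (Int × Int) :=
  (PySem.List.pyRange 0 20 1).flatMap (fun nr =>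
    (PySem.List.pyRange 0 20 1).filterMap (fun nc =>
      if max (nr - r).natAbs (nc - c).natAbs == 1 then some (nr, nc) else none))

-- ===== PRECONDITION & SPEC =====
def Spec_moore_neighbors (r : Int) (c : Int) (out : List (Int × Int)) : Prop := out = moore_neighbors_alt r c
instance (r : Int) (c : Int) (out : List (Int × Int)) : Decidable (Spec_moore_neighbors r c out) := by unfold Spec_moore_neighbors; infer_instance

-- ===== CLAIM (what is proved, stated in full; the proofs are below) =====
def Claim_equal_moore_neighbors : Prop := ∀ (r : Int) (c : Int), Dom_moore_neighbors r c → Spec_moore_neighbors r c (moore_neighbors r c)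

-- ===== LEMMAS AND PROOFS =====

-- proof helper: one bound-checked append step of A's loop body
def pvStep (x y : Int) (acc : List (Int × Int)) : List (Int × Int) :=
  if 0 ≤ x ∧ x < 20 ∧ 0 ≤ y ∧ y < 20 then acc ++ [(x, y)] else acc

-- A's nested foldl over the literal offset lists, written out
lemma A_char (r c : Int) : moore_neighbors r c =
    pvStep (r + 1) (c + 1) (pvStep (r + 1) (c + 0) (pvStep (r + 1) (c + -1)
      (pvStep (r + 0) (c + 1) (pvStep (r + 0) (c + -1)
      (pvStep (r + -1) (c + 1) (pvStep (r + -1) (c + 0) (pvStep (r + -1) (c + -1) []))))))) := rfl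

lemma pvStep_out (x y : Int) (acc : List (Int × Int))
    (h : ¬ (0 ≤ x ∧ x < 20) ∨ ¬ (0 ≤ y ∧ y < 20)) : pvStep x y acc = acc := by
  unfold pvStep; rw [if_neg]; tauto

lemma A_empty (r c : Int) (h : r ≤ -2 ∨ 21 ≤ r ∨ c ≤ -2 ∨ 21 ≤ c) : moore_neighbors r c = [] := by
  rw [A_char]
  repeat rw [pvStep_out _ _ _ (by omega)]

lemma range20_mem : ∀ x ∈ PySem.List.pyRange 0 20 1, 0 ≤ x ∧ x < 20 := by decide

lemma B_empty (r c : Int) (h : r ≤ -2 ∨ 21 ≤ r ∨ c ≤ -2 ∨ 21 ≤ c) : moore_neighbors_alt r c = [] := by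
  unfold moore_neighbors_alt
  rw [List.flatMap_eq_nil_iff]
  intro nr hnr
  rw [List.filterMap_eq_nil_iff]
  intro nc hnc
  have h1 := range20_mem nr hnr
  have h2 := range20_mem nc hnc
  have : ¬ (max (nr - r).natAbs (nc - c).natAbs = 1) := by omega
  simp [this]

set_option maxHeartbeats 4000000 in
lemma inrange_eq : ∀ r ∈ PySem.List.pyRange (-1) 21 1, ∀ c ∈ PySem.List.pyRange (-1) 21 1,
    moore_neighbors r c = moore_neighbors_alt r c := by decide

lemma mem_range_m1_21 (x : Int) (h1 : -1 ≤ x) (h2 : x ≤ 20) : x ∈ PySem.List.pyRange (-1) 21 1 := by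
  rw [PySem.List.mem_pyRange_one]; omega

set_option maxHeartbeats 1000000 in
-- ===== VERDICT (by name: the statement is the Claim_ definition above) =====
theorem moore_neighbors_spec : Claim_equal_moore_neighbors := by
  intro r c _
  unfold Spec_moore_neighbors
  by_cases hr : -1 ≤ r ∧ r ≤ 20
  · by_cases hc : -1 ≤ c ∧ c ≤ 20
    · obtain ⟨hr1, hr2⟩ := hr; obtain ⟨hc1, hc2⟩ := hc
      exact inrange_eq r (mem_range_m1_21 r hr1 hr2) c (mem_range_m1_21 c hc1 hc2)
    · rw [A_empty r c (by omega), B_empty r c (by omega)]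
  · rw [A_empty r c (by omega), B_empty r c (by omega)]
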